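-- pv_equiv track=rewrite | github.com/mdevolde/write_ups | CSCBE25_finals/reversing/linguistics/main.py | c_fisher_yates_unshuffle
-- ===== SOURCE A (Python) =====
-- def c_fisher_yates_unshuffle(data):
--     """
--     Reverses the Fisher-Yates shuffle.
--     'data' must be a multiple of 3 (3*N).
--     """
--     N = len(data) // 3
--     swaps = [(n - 1, 0) for n in range(N, 1, -1)]  # Generate swaps
--     for (posA, posB) in reversed(swaps):  # Reverse swaps
--         startA, startB = posA * 3, posB * 3
--         for offset in range(3):  # Swap 3-byte blocks
--             data[startA + offset], data[startB + offset] = \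
--                 data[startB + offset], data[startA + offset]
--     return data
-- ===== SOURCE B (Python) =====
-- def c_fisher_yates_unshuffle(data):
--     """
--     Reverses the Fisher-Yates shuffle.
--     'data' must be a multiple of 3 (3*N).
--     The swap sequence is a right-rotation of the N 3-byte blocks:
--     move the last block to the front in one slice assignment.
--     """
--     N = len(data) // 3
--     if N >= 2:
--         data[:3 * N] = data[3 * (N - 1):3 * N] + data[:3 * (N - 1)]
--     return data
-- ===== Notes on version B (the rewrite author's own statement) =====
-- stated objective: simpler
-- what changed: A undoes the shuffle by performing N-1 successive 3-byte block swaps (each against block 0) in an interpreted loop; B recognizes that this sequence is exactly a right-rotation of the N blocks and performs it as a single slice assignment (last block moved to the front), leaving any trailing non-block bytes untouched.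
import Mathlib
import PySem

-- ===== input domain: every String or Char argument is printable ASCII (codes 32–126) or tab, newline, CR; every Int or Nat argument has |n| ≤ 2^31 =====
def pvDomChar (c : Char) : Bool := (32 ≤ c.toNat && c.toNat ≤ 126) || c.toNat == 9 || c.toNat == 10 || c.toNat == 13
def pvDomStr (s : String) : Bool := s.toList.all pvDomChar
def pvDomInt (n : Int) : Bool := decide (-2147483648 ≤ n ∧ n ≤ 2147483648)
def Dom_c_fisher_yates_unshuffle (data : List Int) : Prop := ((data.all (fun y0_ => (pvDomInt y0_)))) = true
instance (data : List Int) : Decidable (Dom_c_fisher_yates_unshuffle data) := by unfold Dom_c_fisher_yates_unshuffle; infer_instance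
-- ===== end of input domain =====

-- B: the same unshuffle as one right-rotation of the 3-byte blocks (a single slice
-- assignment) instead of A's chain of pairwise block swaps; 'simpler'. Both Pythons
-- mutate `data` in place and return it; the theorems are about the returned value,
-- which is the whole mutated list.

-- ===== PORT A =====
-- data[i], data[j] = data[j], data[i]: both reads happen before both writes.
-- Indices are always in range in A (posA ≤ N-1, so startA+offset < 3N ≤ len),
-- so `getD … 0` / `set` are exact here; `.toNat` converts a provably
-- non-negative product, never a negative Python index.
def pvSwapStep (l : List Int) (i j : Nat) : List Int :=
  let vB := l.getD j 0
  let vA := l.getD i 0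
  (l.set i vB).set j vA

def pvBlockSwap (l : List Int) (sA sB : Nat) : List Int :=
  (List.range 3).foldl (fun d off => pvSwapStep d (sA + off) (sB + off)) l

def c_fisher_yates_unshuffle (data : List Int) : List Int :=
  let N : Int := PySem.Int.floordiv (data.length : Int) 3
  let swaps : List (Int × Int) := (PySem.List.pyRange N 1 (-1)).map (fun n => (n - 1, (0 : Int)))
  swaps.reverse.foldl (fun d p => pvBlockSwap d (p.1 * 3).toNat (p.2 * 3).toNat) data

-- ===== PORT B =====
-- data[:3N] = data[3(N-1):3N] + data[:3(N-1)]; the tail data[3N:] is untouched.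
def c_fisher_yates_unshuffle_alt (data : List Int) : List Int :=
  let N : Nat := data.length / 3
  if 2 ≤ N then
    PySem.List.slice data (some ((3 * (N - 1) : Nat) : Int)) (some ((3 * N : Nat) : Int))
      ++ PySem.List.slice data none (some ((3 * (N - 1) : Nat) : Int))
      ++ data.drop (3 * N)
  else data

-- ===== PRECONDITION & SPEC =====
def Spec_c_fisher_yates_unshuffle (data : List Int) (out : List Int) : Prop := out = c_fisher_yates_unshuffle_alt data
instance (data : List Int) (out : List Int) : Decidable (Spec_c_fisher_yates_unshuffle data out) := by unfold Spec_c_fisher_yates_unshuffle; infer_instance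

-- ===== CLAIM (what is proved, stated in full; the proofs are below) =====
def Claim_equal_c_fisher_yates_unshuffle : Prop := ∀ (data : List Int), Dom_c_fisher_yates_unshuffle data → Spec_c_fisher_yates_unshuffle data (c_fisher_yates_unshuffle data)

-- ===== LEMMAS AND PROOFS =====

theorem pvSwapStep_split (P L : List Int) (k j : Nat) (hj : j < P.length) :
    pvSwapStep (P ++ L) (P.length + k) j
      = P.set j (L.getD k 0) ++ L.set k (P.getD j 0) := by
  simp only [pvSwapStep]
  rw [List.getD_append _ _ _ _ hj,
      List.getD_append_right _ _ _ _ (by omega), Nat.add_sub_cancel_left,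
      List.set_append_right _ _ (by omega), Nat.add_sub_cancel_left,
      List.set_append_left _ _ hj]

theorem pvBlockSwap_spec (a0 a1 a2 c0 c1 c2 : Int) (M R : List Int) :
    pvBlockSwap ([a0,a1,a2] ++ M ++ [c0,c1,c2] ++ R) (3 + M.length) 0
      = [c0,c1,c2] ++ M ++ [a0,a1,a2] ++ R := by
  have key : ∀ (x0 x1 x2 y0 y1 y2 : Int) (off : Nat), off < 3 →
      pvSwapStep ([x0,x1,x2] ++ M ++ [y0,y1,y2] ++ R) (3 + M.length + off) off
        = ([x0,x1,x2].set off ([y0,y1,y2].getD off 0)) ++ M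
            ++ ([y0,y1,y2].set off ([x0,x1,x2].getD off 0)) ++ R := by
    intro x0 x1 x2 y0 y1 y2 off hoff
    have h := pvSwapStep_split ([x0,x1,x2] ++ M) ([y0,y1,y2] ++ R) off off
      (by simp; omega)
    rw [List.append_assoc ([x0,x1,x2] ++ M) [y0,y1,y2] R,
        show 3 + M.length + off = ([x0,x1,x2] ++ M).length + off by
          simp only [List.length_append, List.length_cons, List.length_nil],
        h,
        List.set_append_left _ _ (by simp; omega),
        List.set_append_left _ _ (by simp; omega),
        List.getD_append _ _ _ _ (by simp; omega),
        List.getD_append _ _ _ _ (by simp; omega)]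
    simp
  simp only [pvBlockSwap, List.range_succ, List.range_zero, List.nil_append,
    List.foldl_append, List.foldl_cons, List.foldl_nil, Nat.zero_add]
  rw [show 3 + M.length = 3 + M.length + 0 by omega, key _ _ _ _ _ _ 0 (by omega)]
  simp only [List.set, List.getD, List.getElem?_cons_zero, Option.getD_some]
  rw [key _ _ _ _ _ _ 1 (by omega)]
  simp only [List.set, List.getD, List.getElem?_cons_succ, List.getElem?_cons_zero,
    Option.getD_some]
  rw [key _ _ _ _ _ _ 2 (by omega)]
  simp

theorem pvLoop_inv : ∀ (m : Nat) (l : List Int), 1 ≤ m → 3 * m ≤ l.length →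
    (PySem.List.pyRange 2 ((m : Int) + 1) 1).foldl
        (fun d n => pvBlockSwap d ((n - 1) * 3).toNat 0) l
      = (l.drop (3 * (m - 1))).take 3 ++ l.take (3 * (m - 1)) ++ l.drop (3 * m) := by
  intro m
  induction m with
  | zero => intro l h; omega
  | succ m ih =>
    intro l _ hlen
    by_cases hm : 1 ≤ m
    · rw [show ((m + 1 : Nat) : Int) + 1 = ((m : Int) + 1) + 1 by push_cast; ring,
          PySem.List.pyRange_one_succ_right (a := 2) (b := (m : Int) + 1) (by omega),
          List.foldl_append, ih l hm (by omega), List.foldl_cons, List.foldl_nil]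
      have hA : ∃ a0 a1 a2 : Int, (l.drop (3 * (m - 1))).take 3 = [a0, a1, a2] := by
        rw [← List.length_eq_three]
        rw [List.length_take, List.length_drop]; omega
      have hC : ∃ c0 c1 c2 : Int, (l.drop (3 * m)).take 3 = [c0, c1, c2] := by
        rw [← List.length_eq_three]
        rw [List.length_take, List.length_drop]; omega
      obtain ⟨a0, a1, a2, hA⟩ := hA
      obtain ⟨c0, c1, c2, hC⟩ := hC
      have hCsplit : l.drop (3 * m) = [c0, c1, c2] ++ l.drop (3 * (m + 1)) := by
        conv_lhs => rw [← List.take_append_drop 3 (l.drop (3 * m))]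
        rw [hC, List.drop_drop]
        congr 2
      have hidx : (((m : Int) + 1 - 1) * 3).toNat = 3 + (l.take (3 * (m - 1))).length := by
        rw [List.length_take]
        omega
      rw [hA, hCsplit, hidx]
      rw [← List.append_assoc ([a0, a1, a2] ++ l.take (3 * (m - 1))) [c0, c1, c2]
            (l.drop (3 * (m + 1))),
          pvBlockSwap_spec]
      have htake : l.take (3 * m) = l.take (3 * (m - 1)) ++ [a0, a1, a2] := by
        rw [show 3 * m = 3 * (m - 1) + 3 by omega, List.take_add, hA]
      rw [show (m + 1 - 1) = m from rfl, htake, hC]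
      simp [List.append_assoc]
    · have hm0 : m = 0 := by omega
      subst hm0
      rw [show ((1 : Nat) : Int) + 1 = 2 by norm_num,
          PySem.List.pyRange_one_eq_nil (by norm_num), List.foldl_nil]
      simp [List.take_append_drop]

theorem pv_main_eq (data : List Int) :
    c_fisher_yates_unshuffle data = c_fisher_yates_unshuffle_alt data := by
  have hN : PySem.Int.floordiv ((data.length : Int)) 3 = ((data.length / 3 : Nat) : Int) := by
    exact_mod_cast PySem.Int.floordiv_natCast data.length 3
  simp only [c_fisher_yates_unshuffle, c_fisher_yates_unshuffle_alt, hN]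
  rw [PySem.List.pyRange_neg_one_eq_reverse, show ((1 : Int) + 1) = 2 by norm_num,
      List.map_reverse, List.reverse_reverse, List.foldl_map]
  simp only [Int.zero_mul, Int.toNat_zero]
  by_cases h2 : 2 ≤ data.length / 3
  · rw [if_pos h2,
        pvLoop_inv (data.length / 3) data (by omega)
          (by have := Nat.div_mul_le_self data.length 3; omega),
        PySem.List.slice_natCast, PySem.List.slice_to_natCast,
        show 3 * (data.length / 3) - 3 * (data.length / 3 - 1) = 3 by omega]
  · rw [if_neg h2,
        PySem.List.pyRange_one_eq_nil (a := 2) (b := ((data.length / 3 : Nat) : Int) + 1)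
          (by omega),
        List.foldl_nil]

-- ===== VERDICT (by name: the statement is the Claim_ definition above) =====
theorem c_fisher_yates_unshuffle_spec : Claim_equal_c_fisher_yates_unshuffle := by
  intro data _
  unfold Spec_c_fisher_yates_unshuffle
  exact pv_main_eq data
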